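-- pv_equiv track=rewrite | github.com/Alvaropz/Python_problems_BinarySearch | 1. Easy/inverse_factorial/inverse_factorial.py | inverse_factorial
-- ===== SOURCE A (Python) =====
-- def inverse_factorial(a):
--     if a == 1:
--         return 0
--     total = 1
--     for number in range(2, a+1):
--         total *= number
--         if total == a:
--             return number
--         if total > a:
--             return -1
-- ===== SOURCE B (Python) =====
-- def inverse_factorial(a):
--     if a == 1:
--         return 0
--     if a < 1:
--         return None
--     n = 2
--     while a % n == 0:
--         a //= n
--         if a == 1:
--             return n
--         n += 1
--     return -1
-- ===== Notes on version B (the rewrite author's own statement) =====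
-- stated objective: alternative
-- what changed: B searches downward by successively dividing a by increasing integers while divisible (reaching one exactly when a is a factorial), instead of A's upward accumulation of factorials compared against a.
-- outside the precondition, e.g. on inverse_factorial(0): A returns None, B returns None; on inverse_factorial(-3): A returns None, B returns None
import Mathlib
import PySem

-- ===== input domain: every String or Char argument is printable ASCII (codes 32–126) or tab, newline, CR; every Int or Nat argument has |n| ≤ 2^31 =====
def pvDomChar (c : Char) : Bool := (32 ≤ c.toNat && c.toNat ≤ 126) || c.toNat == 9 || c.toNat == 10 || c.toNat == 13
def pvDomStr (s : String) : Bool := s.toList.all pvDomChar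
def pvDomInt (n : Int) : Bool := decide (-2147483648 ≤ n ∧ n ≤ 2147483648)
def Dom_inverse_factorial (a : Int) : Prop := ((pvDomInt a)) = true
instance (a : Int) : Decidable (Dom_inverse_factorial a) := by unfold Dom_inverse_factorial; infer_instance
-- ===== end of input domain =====

-- B replaces A's upward factorial accumulation by downward successive division of a by increasing integers;
-- objective: alternative (a genuinely different strategy, similar cost).

-- ===== PORT A =====
-- for number in range(2, a+1): total *= number; if total == a: return number; if total > a: return -1
-- (falling off the loop returns None in Python; that happens only for a ≤ 0, excluded by Pre_;
--  the Lean port returns 0 there, outside the claim)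
-- the range(2, a+1) iteration is transcribed as a counter recursion over number = 2, 3, …, a
def inverse_factorialLoop (a number total : Int) : Int :=
  if h : number < a + 1 then
    let t := total * number
    if t = a then number else if t > a then -1 else inverse_factorialLoop a (number + 1) t
  else 0
termination_by (a + 1 - number).toNat
decreasing_by omega

def inverse_factorial (a : Int) : Int :=
  if a = 1 then 0 else inverse_factorialLoop a 2 1

-- ===== PORT B =====
-- while a % n == 0: a //= n; if a == 1: return n; n += 1
-- fuel a.toNat + 1 only makes the recursion total; it is never exhausted for a ≥ 2
def inverse_factorialAltLoop : Nat → Int → Int → Int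
  | 0, _, _ => -1
  | fuel + 1, b, n =>
    if b % n = 0 then
      let b' := PySem.Int.floordiv b n
      if b' = 1 then n else inverse_factorialAltLoop fuel b' (n + 1)
    else -1

def inverse_factorial_alt (a : Int) : Int :=
  if a = 1 then 0
  else if a < 1 then 0  -- Python B returns None here (outside Pre_); 0 is an arbitrary total value
  else inverse_factorialAltLoop (a.toNat + 1) a 2

-- ===== PRECONDITION & SPEC =====
-- Pre_ excludes a ≤ 0, on which the Python A falls off its for-loop and returns None, not an int.
def Pre_inverse_factorial (a : Int) : Prop := 1 ≤ a
instance (a : Int) : Decidable (Pre_inverse_factorial a) := by unfold Pre_inverse_factorial; infer_instance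
def pvWitness_inverse_factorial : Int := (24)

def Spec_inverse_factorial (a : Int) (out : Int) : Prop := out = inverse_factorial_alt a
instance (a : Int) (out : Int) : Decidable (Spec_inverse_factorial a out) := by unfold Spec_inverse_factorial; infer_instance

-- ===== CLAIM (what is proved, stated in full; the proofs are below) =====
def Claim_equal_inverse_factorial : Prop := ∀ (a : Int), Dom_inverse_factorial a → Pre_inverse_factorial a → Spec_inverse_factorial a (inverse_factorial a)

-- ===== LEMMAS AND PROOFS =====

theorem fact_pos' (k : Nat) : (0:Int) < (Nat.factorial k : Int) := by
  exact_mod_cast Nat.factorial_pos k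

theorem fact_ge_self (k : Nat) : (k : Int) ≤ (Nat.factorial k : Int) := by
  exact_mod_cast Nat.self_le_factorial k

theorem fact_succ' (k : Nat) (hk : 1 ≤ k) :
    (Nat.factorial (k - 1) : Int) * (k : Int) = (Nat.factorial k : Int) := by
  obtain ⟨m, rfl⟩ := Nat.exists_eq_add_of_le hk
  have h : 1 + m = m + 1 := by omega
  simp [h, Nat.factorial_succ]; push_cast; ring

theorem fact_strictMono {m n : Nat} (hm : 0 < m) (h : m < n) :
    (Nat.factorial m : Int) < (Nat.factorial n : Int) := by
  exact_mod_cast (Nat.factorial_lt hm).2 h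

-- A's loop, no-factorial case: returns -1
theorem loopA_none : ∀ (j : Nat) (k : Nat) (a : Int), (a + 1 - (k:Int)).toNat = j →
    2 ≤ k → (Nat.factorial (k - 1) : Int) < a →
    (∀ n : Nat, k ≤ n → (Nat.factorial n : Int) ≠ a) →
    inverse_factorialLoop a (k : Int) (Nat.factorial (k - 1)) = -1 := by
  intro j
  induction j with
  | zero =>
    intro k a hj hk ha _
    exfalso
    have h1 : ((k:Int) - 1) ≤ (Nat.factorial (k - 1) : Int) := by
      have := fact_ge_self (k - 1)
      have : ((k - 1 : Nat) : Int) ≤ (Nat.factorial (k - 1) : Int) := this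
      omega
    omega
  | succ j ih =>
    intro k a hj hk ha hnone
    have hk1 : ((k:Int) - 1) ≤ (Nat.factorial (k - 1) : Int) := by
      have := fact_ge_self (k - 1); omega
    have hklt : (k : Int) < a + 1 := by omega
    rw [inverse_factorialLoop, dif_pos hklt]
    have hfk : (Nat.factorial (k - 1) : Int) * (k : Int) = (Nat.factorial k : Int) :=
      fact_succ' k (by omega)
    rw [hfk]
    have hne : (Nat.factorial k : Int) ≠ a := hnone k le_rfl
    rw [if_neg hne]
    by_cases hgt : (Nat.factorial k : Int) > a
    · rw [if_pos hgt]
    · rw [if_neg hgt]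
      have hlt : (Nat.factorial k : Int) < a := by omega
      have : ((k:Int) + 1) = ((k + 1 : Nat) : Int) := by push_cast; ring
      rw [this]
      have hfix : Nat.factorial k = Nat.factorial ((k + 1) - 1) := by simp
      rw [hfix]
      exact ih (k + 1) a (by omega) (by omega) (by simpa using hlt)
        (fun n hn => hnone n (by omega))

-- A's loop, factorial case: returns n
theorem loopA_some : ∀ (j : Nat) (k n : Nat) (a : Int), (a + 1 - (k:Int)).toNat = j →
    2 ≤ k → k ≤ n → (Nat.factorial (k - 1) : Int) < a → (Nat.factorial n : Int) = a →
    inverse_factorialLoop a (k : Int) (Nat.factorial (k - 1)) = n := by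
  intro j
  induction j with
  | zero =>
    intro k n a hj hk _ ha _
    exfalso
    have : ((k - 1 : Nat) : Int) ≤ (Nat.factorial (k - 1) : Int) := fact_ge_self (k - 1)
    omega
  | succ j ih =>
    intro k n a hj hk hkn ha hfa
    have hk1 : ((k:Int) - 1) ≤ (Nat.factorial (k - 1) : Int) := by
      have := fact_ge_self (k - 1); omega
    have hklt : (k : Int) < a + 1 := by omega
    rw [inverse_factorialLoop, dif_pos hklt]
    have hfk : (Nat.factorial (k - 1) : Int) * (k : Int) = (Nat.factorial k : Int) :=
      fact_succ' k (by omega)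
    rw [hfk]
    rcases eq_or_lt_of_le hkn with heq | hlt
    · subst heq; rw [if_pos hfa]
    · have hflt : (Nat.factorial k : Int) < a := by
        rw [← hfa]; exact fact_strictMono (by omega) hlt
      rw [if_neg (by omega), if_neg (by omega)]
      have : ((k:Int) + 1) = ((k + 1 : Nat) : Int) := by push_cast; ring
      rw [this]
      have hfix : Nat.factorial k = Nat.factorial ((k + 1) - 1) := by simp
      rw [hfix]
      exact ih (k + 1) n a (by omega) (by omega) (by omega) (by simpa using hflt) hfa

-- B's loop, no-factorial case: returns -1.  Invariant: the original a equals b * (k-1)!.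
theorem loopB_none : ∀ (fuel : Nat) (b : Int) (k : Nat), 2 ≤ k → 1 < b → b.toNat ≤ fuel →
    (∀ n : Nat, k ≤ n → (Nat.factorial n : Int) ≠ b * (Nat.factorial (k - 1) : Int)) →
    inverse_factorialAltLoop fuel b (k : Int) = -1 := by
  intro fuel
  induction fuel with
  | zero => intro b k _ hb hf _; omega
  | succ fuel ih =>
    intro b k hk hb hf hnone
    simp only [inverse_factorialAltLoop]
    by_cases hmod : b % (k : Int) = 0
    · rw [if_pos hmod]
      have hkpos : (0:Int) < (k:Int) := by exact_mod_cast Nat.lt_of_lt_of_le (by norm_num) hk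
      have hdvd : (k : Int) ∣ b := Int.dvd_of_emod_eq_zero hmod
      obtain ⟨c, hc⟩ := hdvd
      have hfl : PySem.Int.floordiv b (k : Int) = c := by
        simp [PySem.Int.floordiv, hc, Int.mul_fdiv_cancel_left _ (by omega : (k:Int) ≠ 0)]
      rw [hfl]
      have hcpos : 0 < c := by nlinarith
      by_cases hc1 : c = 1
      · exfalso
        apply hnone k le_rfl
        rw [hc, hc1, mul_one, mul_comm]
        exact (fact_succ' k (by omega)).symm
      · rw [if_neg hc1]
        have hcb : c < b := by nlinarith
        have : ((k:Int) + 1) = ((k + 1 : Nat) : Int) := by push_cast; ring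
        rw [this]
        apply ih c (k + 1) (by omega) (by omega) (by omega)
        intro n hn
        have hfix : (Nat.factorial ((k + 1) - 1) : Int) = (Nat.factorial (k - 1) : Int) * (k : Int) := by
          simpa using (fact_succ' k (by omega)).symm
        rw [hfix]
        have : c * ((Nat.factorial (k - 1) : Int) * (k : Int)) = b * (Nat.factorial (k - 1) : Int) := by
          rw [hc]; ring
        rw [this]
        exact hnone n (by omega)
    · rw [if_neg hmod]

-- B's loop, factorial case: returns n
theorem loopB_some : ∀ (fuel : Nat) (b : Int) (k n : Nat), 2 ≤ k → k ≤ n → 1 < b →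
    b.toNat ≤ fuel → (Nat.factorial n : Int) = b * (Nat.factorial (k - 1) : Int) →
    inverse_factorialAltLoop fuel b (k : Int) = n := by
  intro fuel
  induction fuel with
  | zero => intro b k n _ _ hb hf _; omega
  | succ fuel ih =>
    intro b k n hk hkn hb hf hfa
    simp only [inverse_factorialAltLoop]
    have hkpos : (0:Int) < (k:Int) := by exact_mod_cast Nat.lt_of_lt_of_le (by norm_num) hk
    have hfpos := fact_pos' (k - 1)
    have hdvdfact : (Nat.factorial k : Int) ∣ (Nat.factorial n : Int) := by
      exact_mod_cast Int.natCast_dvd_natCast.2 (Nat.factorial_dvd_factorial hkn)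
    have hdvd : (k : Int) ∣ b := by
      obtain ⟨d, hd⟩ := hdvdfact
      have hfk : (Nat.factorial (k - 1) : Int) * (k : Int) = (Nat.factorial k : Int) :=
        fact_succ' k (by omega)
      have : b * (Nat.factorial (k - 1) : Int) = (Nat.factorial (k - 1) : Int) * (k : Int) * d := by
        rw [hfk, ← hd, hfa]
      refine ⟨d, ?_⟩
      have hcancel : b * (Nat.factorial (k - 1) : Int) = ((k : Int) * d) * (Nat.factorial (k - 1) : Int) := by
        rw [this]; ring
      exact mul_right_cancel₀ (by omega) hcancel
    have hmod : b % (k : Int) = 0 := Int.emod_eq_zero_of_dvd hdvd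
    rw [if_pos hmod]
    obtain ⟨c, hc⟩ := hdvd
    have hfl : PySem.Int.floordiv b (k : Int) = c := by
      simp [PySem.Int.floordiv, hc, Int.mul_fdiv_cancel_left _ (by omega : (k:Int) ≠ 0)]
    rw [hfl]
    have hcpos : 0 < c := by nlinarith
    have hckey : (Nat.factorial n : Int) = c * (Nat.factorial k : Int) := by
      rw [hfa, hc, ← fact_succ' k (by omega)]; ring
    by_cases hc1 : c = 1
    · rw [if_pos hc1]
      have : (Nat.factorial n : Int) = (Nat.factorial k : Int) := by rw [hckey, hc1, one_mul]
      have hnk : n = k := by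
        by_contra hne
        have hlt : k < n := by omega
        have := fact_strictMono (m := k) (by omega) hlt
        omega
      exact_mod_cast hnk.symm
    · rw [if_neg hc1]
      have hckn : k < n := by
        by_contra hge
        have hnk : n = k := by omega
        rw [hnk] at hckey
        have hfp := fact_pos' k
        have hc2 : 2 ≤ c := by omega
        nlinarith [hckey]
      have hcb : c < b := by nlinarith
      have : ((k:Int) + 1) = ((k + 1 : Nat) : Int) := by push_cast; ring
      rw [this]
      apply ih c (k + 1) n (by omega) (by omega) (by omega) (by omega)
      simpa using hckey

-- ===== VERDICT (by name: the statement is the Claim_ definition above) =====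
theorem inverse_factorial_spec : Claim_equal_inverse_factorial := by
  intro a _ hpre
  unfold Spec_inverse_factorial inverse_factorial inverse_factorial_alt
  have hpre' : (1 : Int) ≤ a := hpre
  by_cases h1 : a = 1
  · simp [h1]
  · rw [if_neg h1, if_neg h1, if_neg (by omega : ¬ a < 1)]
    have ha2 : 2 ≤ a := by omega
    by_cases hex : ∃ n : Nat, 2 ≤ n ∧ (Nat.factorial n : Int) = a
    · obtain ⟨n, hn2, hfa⟩ := hex
      have hA : inverse_factorialLoop a ((2:Nat) : Int) (Nat.factorial (2 - 1)) = n :=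
        loopA_some (a + 1 - 2).toNat 2 n a rfl le_rfl hn2 (by norm_num [Nat.factorial]; omega) hfa
      have hB : inverse_factorialAltLoop (a.toNat + 1) a ((2:Nat) : Int) = n :=
        loopB_some (a.toNat + 1) a 2 n le_rfl hn2 (by omega) (by omega)
          (by norm_num [Nat.factorial]; omega)
      simpa [Nat.factorial] using hA.trans hB.symm
    · push_neg at hex
      have hnone : ∀ n : Nat, 2 ≤ n → (Nat.factorial n : Int) ≠ a := fun n hn => hex n hn
      have hA : inverse_factorialLoop a ((2:Nat) : Int) (Nat.factorial (2 - 1)) = -1 :=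
        loopA_none (a + 1 - 2).toNat 2 a rfl le_rfl (by norm_num [Nat.factorial]; omega) hnone
      have hB : inverse_factorialAltLoop (a.toNat + 1) a ((2:Nat) : Int) = -1 :=
        loopB_none (a.toNat + 1) a 2 le_rfl (by omega) (by omega)
          (by intro n hn; norm_num [Nat.factorial]; exact hnone n hn)
      simpa [Nat.factorial] using hA.trans hB.symm
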